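-- pv_equiv track=rewrite | github.com/ZuckermanLab/phat | phat/classifiers.py | loop_erasure
-- ===== SOURCE A (Python) =====
-- def loop_erasure(path):
--     """Return the loop-erasure of a discrete sample path.
--
--     Parameters
--     ----------
--     path : sequence
--         A sequence of hashable values.
--
--     Returns
--     -------
--     tuple
--         The loop erasure of `path`.
--
--     """
--     if len(path) == 0:
--         return ()
--     last_index = {x: k for k, x in enumerate(path)}
--     sel = [0]
--     while path[sel[-1]] != path[-1]:
--         sel.append(last_index[path[sel[-1]]] + 1)
--     return tuple(path[k] for k in sel)
-- ===== SOURCE B (Python) =====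
-- def loop_erasure(path):
--     """Chronological stack-based loop erasure: pop each loop as it closes."""
--     stack = []
--     for x in path:
--         if x in stack:
--             del stack[stack.index(x) + 1:]
--         else:
--             stack.append(x)
--     return tuple(stack)
-- ===== Notes on version B (the rewrite author's own statement) =====
-- stated objective: simpler
-- what changed: Replaced A's precomputed last-occurrence dict and forward index-jumping while-loop by a single chronological left-to-right pass that keeps a stack and truncates it back to the first occurrence whenever a value recurs (pops each loop as it closes).
import Mathlib
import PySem

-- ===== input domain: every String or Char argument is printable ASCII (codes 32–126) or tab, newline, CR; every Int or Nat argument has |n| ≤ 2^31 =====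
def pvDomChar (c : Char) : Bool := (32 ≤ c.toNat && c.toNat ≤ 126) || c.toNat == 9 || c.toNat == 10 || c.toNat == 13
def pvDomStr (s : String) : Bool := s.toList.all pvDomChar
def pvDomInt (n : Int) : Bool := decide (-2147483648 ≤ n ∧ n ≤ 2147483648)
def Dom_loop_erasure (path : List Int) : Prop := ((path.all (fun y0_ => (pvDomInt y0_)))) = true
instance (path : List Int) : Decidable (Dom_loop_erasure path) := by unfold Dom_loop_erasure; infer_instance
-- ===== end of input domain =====

-- B replaces A's last-occurrence table and forward jumps by a single chronological pass that
-- pops each loop as it closes (objective: alternative one-pass formulation; no speed claim).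

-- ===== PORT A =====
-- last_index = {x: k for k, x in enumerate(path)}
def pvLastIdx (path : List Int) : PySem.Dict Int Int :=
  (PySem.List.enumerate path).foldl (fun d kx => d.insert kx.2 kx.1) PySem.Dict.empty

-- while path[sel[-1]] != path[-1]: sel.append(last_index[path[sel[-1]]] + 1)
-- (sel is kept reversed: its Python tail sel[-1] is the head here; fuel = len(path) suffices,
--  proved below — the loop's index strictly increases and stops at the last position)
def pvSelLoop (path : List Int) (last : PySem.Dict Int Int) : Nat → List Int → List Int
  | 0, sel => sel
  | Nat.succ f, sel =>
      if PySem.List.pyGet? path (sel.headD 0) ≠ PySem.List.pyGet? path (-1) then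
        pvSelLoop path last f
          ((last.getD (PySem.List.pyGetD path (sel.headD 0) 0) 0 + 1) :: sel)
      else sel

def loop_erasure (path : List Int) : List Int :=
  if path.length = 0 then []
  else (pvSelLoop path (pvLastIdx path) path.length [0]).reverse.map
        (fun k => PySem.List.pyGetD path k 0)

-- ===== PORT B =====
-- if x in stack: del stack[stack.index(x) + 1:]  else: stack.append(x)
def pvStackStep (stack : List Int) (x : Int) : List Int :=
  match PySem.List.index? stack x with
  | some i => stack.take (i + 1)
  | none => stack ++ [x]

def loop_erasure_alt (path : List Int) : List Int :=
  path.foldl pvStackStep []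

-- ===== PRECONDITION & SPEC =====
def Spec_loop_erasure (path : List Int) (out : List Int) : Prop := out = loop_erasure_alt path
instance (path : List Int) (out : List Int) : Decidable (Spec_loop_erasure path out) := by unfold Spec_loop_erasure; infer_instance

-- ===== CLAIM (what is proved, stated in full; the proofs are below) =====
def Claim_equal_loop_erasure : Prop := ∀ (path : List Int), Dom_loop_erasure path → Spec_loop_erasure path (loop_erasure path)

-- ===== LEMMAS AND PROOFS =====

-- Reference: loop erasure by recursion on the suffix after the last occurrence of the head.
def pvLE : List Int → List Int
  | [] => []
  | x :: rest => x :: pvLE ((rest.reverse.takeWhile (· != x)).reverse)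
termination_by l => l.length
decreasing_by
  have h : ∀ (l : List Int), (l.takeWhile (· != x)).length ≤ l.length := by
    intro l; induction l with
    | nil => simp
    | cons y ys ih => by_cases h : (y != x) = true <;> simp [h] <;> omega
  have := h rest.reverse
  simp at this ⊢; omega

-- last-occurrence decomposition
theorem pv_last_decomp (v : Int) (l : List Int) (h : v ∈ l) :
    ∃ p s, l = p ++ v :: s ∧ v ∉ s := by
  induction l with
  | nil => cases h
  | cons x xs ih =>
    by_cases hv : v ∈ xs
    · obtain ⟨p, s, hps, hs⟩ := ih hv
      exact ⟨x :: p, s, by simp [hps], hs⟩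
    · have : v = x := by
        rcases List.mem_cons.mp h with h' | h'
        · exact h'
        · exact absurd h' hv
      exact ⟨[], xs, by simp [this], hv⟩

theorem pv_takeWhile_last (x : Int) (a b : List Int) (hb : x ∉ b) :
    (((a ++ x :: b).reverse).takeWhile (· != x)).reverse = b := by
  have hall : ∀ y ∈ b.reverse, (y != x) = true := by
    intro y hy; simp only [bne_iff_ne, ne_eq]
    intro hxy; exact hb (hxy ▸ List.mem_reverse.mp hy)
  simp [List.takeWhile_append_of_pos hall]

theorem pv_takeWhile_all (x : Int) (rest : List Int) (hx : x ∉ rest) :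
    ((rest.reverse.takeWhile (· != x))).reverse = rest := by
  have hall : ∀ y ∈ rest.reverse, (y != x) = true := by
    intro y hy; simp only [bne_iff_ne, ne_eq]
    intro hxy; exact hx (hxy ▸ List.mem_reverse.mp hy)
  simp [List.takeWhile_eq_self_iff.mpr hall]

-- ===== B-side =====

theorem pv_step_head (v x : Int) (s : List Int) :
    ∃ t, pvStackStep (v :: s) x = v :: t := by
  unfold pvStackStep
  cases h : PySem.List.index? (v :: s) x with
  | none => exact ⟨s ++ [x], by simp⟩
  | some i => exact ⟨s.take i, by simp [List.take_succ_cons]⟩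

theorem pv_foldl_head (a : List Int) : ∀ (v : Int) (s : List Int),
    ∃ t, List.foldl pvStackStep (v :: s) a = v :: t := by
  induction a with
  | nil => intro v s; exact ⟨s, rfl⟩
  | cons x xs ih =>
    intro v s
    obtain ⟨t, ht⟩ := pv_step_head v x s
    simpa [List.foldl_cons, ht] using ih v t

theorem pv_step_cons_ne (v x : Int) (s : List Int) (h : x ≠ v) :
    pvStackStep (v :: s) x = v :: pvStackStep s x := by
  unfold pvStackStep
  rw [PySem.List.index?_cons_of_ne s (fun e => h e.symm)]
  cases hx : PySem.List.index? s x with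
  | none => simp
  | some i => simp [List.take_succ_cons]

theorem pv_foldl_cons_not_mem (a : List Int) : ∀ (v : Int) (s : List Int), v ∉ a →
    List.foldl pvStackStep (v :: s) a = v :: List.foldl pvStackStep s a := by
  induction a with
  | nil => intro v s _; rfl
  | cons x xs ih =>
    intro v s hv
    have hx : x ≠ v := fun e => hv (e ▸ List.mem_cons_self)
    have hv' : v ∉ xs := fun e => hv (List.mem_cons_of_mem _ e)
    simp only [List.foldl_cons, pv_step_cons_ne v x s hx]
    exact ih v _ hv'

theorem pv_B_eq_LE (l : List Int) : List.foldl pvStackStep [] l = pvLE l := by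
  induction hl : l.length using Nat.strong_induction_on generalizing l with
  | _ n ih =>
  cases l with
  | nil => simp [pvLE]
  | cons x rest =>
    rw [pvLE]
    have hstep : pvStackStep [] x = [x] := by unfold pvStackStep; simp [PySem.List.index?]
    rw [List.foldl_cons, hstep]
    have hlen := hl
    simp only [List.length_cons] at hlen
    by_cases hx : x ∈ rest
    · obtain ⟨a, b, rfl, hb⟩ := pv_last_decomp x rest hx
      rw [pv_takeWhile_last x a b hb]
      obtain ⟨t, ht⟩ := pv_foldl_head a x []
      have h1 : List.foldl pvStackStep [x] (a ++ x :: b)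
           = List.foldl pvStackStep (pvStackStep (x :: t) x) b := by
        rw [List.foldl_append, ht, List.foldl_cons]
      have hsx : pvStackStep (x :: t) x = [x] := by
        unfold pvStackStep; rw [PySem.List.index?_cons_self]; simp
      rw [h1, hsx, pv_foldl_cons_not_mem b x [] hb]
      have hblen : b.length < n := by
        simp only [List.length_append, List.length_cons] at hlen; omega
      rw [ih b.length hblen b rfl]
    · rw [pv_takeWhile_all x rest hx, pv_foldl_cons_not_mem rest x [] hx]
      rw [ih rest.length (by omega) rest rfl]

-- ===== A-side =====

theorem pv_dict_aux (s : List Int) : ∀ (i : Int) (d : PySem.Dict Int Int) (v : Int), v ∉ s →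
    ((PySem.List.enumerate s i).foldl (fun d kx => d.insert kx.2 kx.1) d).getD v 0 = d.getD v 0 := by
  induction s with
  | nil => intro i d v _; simp [PySem.List.enumerate]
  | cons y ys ih =>
    intro i d v hv
    have hy : v ≠ y := fun e => hv (e ▸ List.mem_cons_self)
    rw [PySem.List.enumerate_cons, List.foldl_cons]
    rw [ih _ _ _ (fun e => hv (List.mem_cons_of_mem _ e))]
    exact PySem.Dict.getD_insert_of_ne _ _ _ hy

theorem pv_dict_getD (p : List Int) : ∀ (s : List Int) (v : Int) (i : Int) (d : PySem.Dict Int Int),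
    v ∉ s →
    ((PySem.List.enumerate (p ++ v :: s) i).foldl (fun d kx => d.insert kx.2 kx.1) d).getD v 0
      = i + p.length := by
  induction p with
  | nil =>
    intro s v i d hv
    rw [List.nil_append, PySem.List.enumerate_cons, List.foldl_cons]
    rw [pv_dict_aux s _ _ _ hv]
    simp [PySem.Dict.getD_insert_self]
  | cons y p' ih =>
    intro s v i d hv
    rw [List.cons_append, PySem.List.enumerate_cons, List.foldl_cons]
    rw [ih s v (i+1) _ hv]
    simp only [List.length_cons]; push_cast; ring

theorem pv_lastIdx_getD (l p s : List Int) (v : Int) (hl : l = p ++ v :: s) (hv : v ∉ s) :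
    (pvLastIdx l).getD v 0 = (p.length : Int) := by
  unfold pvLastIdx
  rw [hl, pv_dict_getD p s v 0 _ hv]
  simp

-- the loop stops at an index holding the last value
theorem pv_loop_stop (l : List Int) (d : PySem.Dict Int Int) (k : Nat)
    (h : l[k]? = l.getLast?) :
    ∀ (f : Nat) (sel : List Int), pvSelLoop l d f ((k : Int) :: sel) = (k : Int) :: sel := by
  intro f sel
  cases f with
  | zero => rfl
  | succ f =>
    rw [pvSelLoop]
    simp only [List.headD_cons]
    rw [if_neg]
    simp only [ne_eq, not_not]
    rw [PySem.List.pyGet?_natCast, PySem.List.pyGet?_neg_one, h]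

-- one continuing iteration: the loop jumps to a strictly larger in-range index
theorem pv_loop_cont (l : List Int) (k : Nat) (hk : k < l.length)
    (h : l[k]? ≠ l.getLast?) :
    ∃ m : Nat, k < m ∧ m < l.length ∧
      (∀ (f : Nat) (sel : List Int),
        pvSelLoop l (pvLastIdx l) (f + 1) ((k : Int) :: sel)
          = pvSelLoop l (pvLastIdx l) f ((m : Int) :: (k : Int) :: sel)) ∧
      (∀ q : List Int, (pvLastIdx (q ++ l)).getD (l.getD k 0) 0 = q.length + m - 1) := by
  set v := l.getD k 0 with hv
  have hkv : l[k]? = some v := by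
    rw [hv, List.getD_eq_getElem?_getD, List.getElem?_eq_getElem hk]; rfl
  have hvl : v ∈ l := List.mem_of_getElem? hkv
  obtain ⟨p, s, hps, hs⟩ := pv_last_decomp v l hvl
  refine ⟨p.length + 1, ?_, ?_, ?_, ?_⟩
  · -- k ≤ p.length
    by_contra hcon
    push Not at hcon
    have hk2 : p.length + 1 ≤ k := by omega
    have : v ∈ s := by
      rw [hps] at hkv
      rw [List.getElem?_append_right (by omega)] at hkv
      have : (v :: s)[k - p.length]? = s[k - p.length - 1]? := by
        cases hkp : k - p.length with
        | zero => omega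
        | succ j => simp
      rw [this] at hkv
      exact List.mem_of_getElem? hkv
    exact hs this
  · -- p.length + 1 < l.length
    have hlen : l.length = p.length + 1 + s.length := by rw [hps]; simp; omega
    by_contra hcon
    push Not at hcon
    have hs0 : s = [] := by
      cases s with
      | nil => rfl
      | cons a t => simp at hlen; omega
    subst hs0
    have : l.getLast? = some v := by rw [hps]; simp
    rw [this] at h
    exact h hkv
  · intro f sel
    rw [pvSelLoop]
    simp only [List.headD_cons]
    rw [if_pos]
    · congr 1
      rw [PySem.List.pyGetD_natCast]
      rw [← hv, pv_lastIdx_getD l p s v hps hs]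
      push_cast; congr 1
    · simp only [ne_eq]
      rw [PySem.List.pyGet?_natCast, PySem.List.pyGet?_neg_one]
      exact h
  · intro q
    have : q ++ l = (q ++ p) ++ v :: s := by rw [hps]; simp
    rw [pv_lastIdx_getD (q ++ l) (q ++ p) s v this hs]
    simp; ring

theorem pv_tail_indep (l : List Int) (d : PySem.Dict Int Int) :
    ∀ (f : Nat) (k : Int) (sel : List Int),
    pvSelLoop l d f (k :: sel) = pvSelLoop l d f [k] ++ sel := by
  intro f
  induction f with
  | zero => intro k sel; rfl
  | succ f ih =>
    intro k sel
    rw [pvSelLoop, pvSelLoop]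
    simp only [List.headD_cons]
    split_ifs with h
    · rw [ih _ (k :: sel), ih _ [k], List.append_assoc]; rfl
    · rfl

-- once the fuel covers the remaining distance, its exact value is irrelevant
theorem pv_fuel_irrel (l : List Int) :
    ∀ (n k f1 f2 : Nat), k < l.length → l.length - 1 - k ≤ n →
    l.length - 1 - k ≤ f1 → l.length - 1 - k ≤ f2 →
    pvSelLoop l (pvLastIdx l) f1 [(k : Int)] = pvSelLoop l (pvLastIdx l) f2 [(k : Int)] := by
  intro n
  induction n with
  | zero =>
    intro k f1 f2 hk hn _ _
    have hkl : k = l.length - 1 := by omega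
    have hstop : l[k]? = l.getLast? := by
      rw [List.getLast?_eq_getElem?, hkl]
    rw [pv_loop_stop l _ k hstop, pv_loop_stop l _ k hstop]
  | succ n ih =>
    intro k f1 f2 hk hn h1 h2
    by_cases hstop : l[k]? = l.getLast?
    · rw [pv_loop_stop l _ k hstop, pv_loop_stop l _ k hstop]
    · obtain ⟨m, hkm, hml, hrec, _⟩ := pv_loop_cont l k hk hstop
      have hd : 1 ≤ l.length - 1 - k := by omega
      obtain ⟨f1', rfl⟩ : ∃ f1', f1 = f1' + 1 := ⟨f1 - 1, by omega⟩
      obtain ⟨f2', rfl⟩ : ∃ f2', f2 = f2' + 1 := ⟨f2 - 1, by omega⟩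
      rw [hrec f1' [], hrec f2' []]
      rw [pv_tail_indep l _ f1' _ [(k : Int)], pv_tail_indep l _ f2' _ [(k : Int)]]
      congr 1
      exact ih m f1' f2' hml (by omega) (by omega) (by omega)

-- every index the loop records is a natural number below the length
theorem pv_members (l : List Int) :
    ∀ (f k : Nat), k < l.length →
    ∀ i ∈ pvSelLoop l (pvLastIdx l) f [(k : Int)], ∃ m : Nat, i = (m : Int) ∧ m < l.length := by
  intro f
  induction f with
  | zero =>
    intro k hk i hi
    simp only [pvSelLoop] at hi
    simp at hi
    exact ⟨k, hi, hk⟩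
  | succ f ih =>
    intro k hk i hi
    by_cases hstop : l[k]? = l.getLast?
    · rw [pv_loop_stop l _ k hstop] at hi
      simp at hi
      exact ⟨k, hi, hk⟩
    · obtain ⟨m, hkm, hml, hrec, _⟩ := pv_loop_cont l k hk hstop
      rw [hrec f [], pv_tail_indep l _ f _ [(k : Int)]] at hi
      rcases List.mem_append.mp hi with hi | hi
      · exact ih m hml i hi
      · simp at hi
        exact ⟨k, hi, hk⟩

-- running A's loop on q ++ b from an index inside b is running it on b, shifted
theorem pv_shift (q b : List Int) (hb : b ≠ []) :
    ∀ (f k : Nat), k < b.length →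
    pvSelLoop (q ++ b) (pvLastIdx (q ++ b)) f [((q.length + k : Nat) : Int)]
      = (pvSelLoop b (pvLastIdx b) f [(k : Int)]).map (fun i => (q.length : Int) + i) := by
  intro f
  induction f with
  | zero => intro k hk; simp [pvSelLoop]
  | succ f ih =>
    intro k hk
    have hgl : (q ++ b)[q.length + k]? = b[k]? := by
      rw [List.getElem?_append_right (by omega)]
      congr 1; omega
    have hlast : (q ++ b).getLast? = b.getLast? := List.getLast?_append_of_ne_nil q hb
    by_cases hstop : b[k]? = b.getLast?
    · have hstop' : (q ++ b)[(q.length + k : Nat)]? = (q ++ b).getLast? := by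
        rw [hgl, hlast, hstop]
      rw [pv_loop_stop (q ++ b) _ _ hstop', pv_loop_stop b _ k hstop]
      simp
      try push_cast
      try ring
    · have hstop' : (q ++ b)[(q.length + k : Nat)]? ≠ (q ++ b).getLast? := by
        rw [hgl, hlast]; exact hstop
      obtain ⟨m, hkm, hml, hrec, hdict⟩ := pv_loop_cont b k hk hstop
      have hkP : q.length + k < (q ++ b).length := by simp; omega
      obtain ⟨m', hkm', hml', hrec', hdict'⟩ := pv_loop_cont (q ++ b) (q.length + k) hkP hstop'
      -- the two jump targets agree: both dict lookups name the same last occurrence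
      have hval : (q ++ b).getD (q.length + k) 0 = b.getD k 0 := by
        rw [List.getD_eq_getElem?_getD, List.getD_eq_getElem?_getD, hgl]
      have hm : m' = q.length + m := by
        have e1 := hdict' []
        have e2 := hdict q
        rw [List.nil_append, hval] at e1
        rw [e1] at e2
        simp only [List.length_nil, Nat.cast_zero] at e2
        omega
      rw [hrec' f [], hrec f []]
      rw [pv_tail_indep (q ++ b) _ f _ [((q.length + k : Nat) : Int)],
          pv_tail_indep b _ f _ [(k : Int)]]
      rw [List.map_append]
      congr 1
      rw [hm]
      exact ih m hml

-- the reversed, value-mapped output of the shifted run is the output of the run on b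
theorem pv_shift_out (q b : List Int) (hb : b ≠ []) (f : Nat) (hf : b.length - 1 ≤ f) :
    ((pvSelLoop (q ++ b) (pvLastIdx (q ++ b)) f [((q.length : Nat) : Int)]).reverse.map
        (fun k => PySem.List.pyGetD (q ++ b) k 0))
      = (pvSelLoop b (pvLastIdx b) b.length [((0 : Nat) : Int)]).reverse.map
        (fun k => PySem.List.pyGetD b k 0) := by
  have hb0 : 0 < b.length := List.length_pos_iff.mpr hb
  have h1 : pvSelLoop (q ++ b) (pvLastIdx (q ++ b)) f [((q.length : Nat) : Int)]
      = (pvSelLoop b (pvLastIdx b) f [((0 : Nat) : Int)]).map (fun i => (q.length : Int) + i) := by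
    have := pv_shift q b hb f 0 hb0
    simpa using this
  have h2 : pvSelLoop b (pvLastIdx b) f [((0 : Nat) : Int)]
      = pvSelLoop b (pvLastIdx b) b.length [((0 : Nat) : Int)] :=
    pv_fuel_irrel b b.length 0 f b.length hb0 (by omega) (by omega) (by omega)
  rw [h1, h2, List.map_reverse, List.map_map, List.map_reverse]
  congr 1
  apply List.map_congr_left
  intro i hi
  obtain ⟨m, rfl, hml⟩ := pv_members b b.length 0 hb0 i hi
  simp only [Function.comp_apply]
  have hcast : (q.length : Int) + (m : Int) = ((q.length + m : Nat) : Int) := by push_cast; ring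
  rw [hcast, PySem.List.pyGetD_natCast, PySem.List.pyGetD_natCast]
  rw [List.getD_eq_getElem?_getD, List.getD_eq_getElem?_getD,
      List.getElem?_append_right (by omega), Nat.add_sub_cancel_left]

theorem pv_A_run (b : List Int) (hb : b ≠ []) :
    loop_erasure b = (pvSelLoop b (pvLastIdx b) b.length [((0 : Nat) : Int)]).reverse.map
        (fun k => PySem.List.pyGetD b k 0) := by
  unfold loop_erasure
  rw [if_neg (by simpa using hb)]
  norm_num

theorem pv_A_eq_LE (l : List Int) : loop_erasure l = pvLE l := by
  induction hl : l.length using Nat.strong_induction_on generalizing l with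
  | _ n ih =>
  cases l with
  | nil => simp [loop_erasure, pvLE]
  | cons x rest =>
    have hne : (x :: rest) ≠ [] := by simp
    have hlen := hl
    simp only [List.length_cons] at hlen
    rw [pv_A_run (x :: rest) hne, pvLE]
    by_cases hstop : (x :: rest)[0]? = (x :: rest).getLast?
    · -- the head is the last value: A stops at once, and the erasure suffix is empty
      rw [pv_loop_stop (x :: rest) _ 0 (by simpa using hstop)]
      have hsuf : ((rest.reverse.takeWhile (· != x))).reverse = [] := by
        cases hr : rest.reverse with
        | nil => simp
        | cons y t =>
          have hrest : rest ≠ [] := by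
            intro e; rw [e] at hr; cases hr
          have hy : y = x := by
            have h1 : (x :: rest).getLast? = some y := by
              rw [show x :: rest = [x] ++ rest from rfl,
                List.getLast?_append_of_ne_nil [x] hrest, ← List.head?_reverse, hr]; rfl
            rw [← hstop] at h1
            simpa using h1.symm
          simp [hy]
      rw [hsuf]
      simp [pvLE]
    · obtain ⟨m, hkm, hml, hrec, hdict⟩ := pv_loop_cont (x :: rest) 0 (by simp) hstop
      rw [show (x :: rest).length = rest.length + 1 from by simp]
      rw [hrec rest.length [], pv_tail_indep _ _ rest.length _ [((0 : Nat) : Int)]]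
      -- decompose: the head x occurs last at position m - 1; the loop then runs inside the suffix
      by_cases hx : x ∈ rest
      · obtain ⟨a, b, rfl, hbx⟩ := pv_last_decomp x rest hx
        rw [pv_takeWhile_last x a b hbx]
        -- m = a.length + 2 from the dictionary characterisation
        have hm : m = a.length + 2 := by
          have h0 := hdict []
          rw [List.nil_append] at h0
          rw [show (x :: (a ++ x :: b)).getD 0 0 = x from rfl] at h0
          have hd := pv_lastIdx_getD (x :: (a ++ x :: b)) (x :: a) b x (by simp) hbx
          rw [hd] at h0
          simp only [List.length_nil, List.length_cons, Nat.cast_zero] at h0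
          push_cast at h0
          omega
        have hbne : b ≠ [] := by
          intro e
          subst e
          apply hstop
          have h1 : (x :: (a ++ [x])).getLast? = some x := by
            rw [show x :: (a ++ [x]) = (x :: a) ++ [x] from by simp, List.getLast?_concat]
          rw [h1]; rfl
        have hout : (pvSelLoop (x :: (a ++ x :: b)) (pvLastIdx (x :: (a ++ x :: b)))
              (a ++ x :: b).length [(m : Int)]).reverse.map
                (fun k => PySem.List.pyGetD (x :: (a ++ x :: b)) k 0)
            = (pvSelLoop b (pvLastIdx b) b.length [((0 : Nat) : Int)]).reverse.map
              (fun k => PySem.List.pyGetD b k 0) := by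
          have hfb : b.length - 1 ≤ (a ++ x :: b).length := by simp; omega
          have hsh := pv_shift_out (x :: a ++ [x]) b hbne (a ++ x :: b).length hfb
          rw [show (x :: a ++ [x]) ++ b = x :: (a ++ x :: b) from by simp] at hsh
          rw [show ((((x : Int) :: a ++ [x]).length : Nat) : Int) = (m : Int) from by
            simp [hm]; omega] at hsh
          exact hsh
        have hsplit : (pvSelLoop (x :: (a ++ x :: b)) (pvLastIdx (x :: (a ++ x :: b)))
              (a ++ x :: b).length [(m : Int)] ++ [((0 : Nat) : Int)]).reverse
            = ((0 : Nat) : Int) :: (pvSelLoop (x :: (a ++ x :: b)) (pvLastIdx (x :: (a ++ x :: b)))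
              (a ++ x :: b).length [(m : Int)]).reverse := by simp
        rw [hsplit, List.map_cons, hout]
        have hb2 : b.length < n := by
          have hr2 : (a ++ x :: b).length = a.length + 1 + b.length := by simp; omega
          omega
        rw [← pv_A_run b hbne, ih b.length hb2 b rfl]
        simp
      · -- x does not recur: m = 1 and the tail run lives entirely in rest
        rw [pv_takeWhile_all x rest hx]
        have hrne : rest ≠ [] := by
          intro e
          subst e
          exact hstop (by simp)
        have hm : m = 1 := by
          have h0 := hdict []
          rw [List.nil_append] at h0
          rw [show (x :: rest).getD 0 0 = x from rfl] at h0
          have hd := pv_lastIdx_getD (x :: rest) [] rest x (by simp) hx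
          rw [hd] at h0
          simp only [List.length_nil, Nat.cast_zero] at h0
          omega
        have hout : (pvSelLoop (x :: rest) (pvLastIdx (x :: rest)) rest.length
              [(m : Int)]).reverse.map (fun k => PySem.List.pyGetD (x :: rest) k 0)
            = (pvSelLoop rest (pvLastIdx rest) rest.length [((0 : Nat) : Int)]).reverse.map
              (fun k => PySem.List.pyGetD rest k 0) := by
          have hfb : rest.length - 1 ≤ rest.length := by omega
          have hsh := pv_shift_out [x] rest hrne rest.length hfb
          rw [show ([x] ++ rest) = x :: rest from by simp] at hsh
          rw [show ((([x] : List Int).length : Nat) : Int) = (m : Int) from by simp [hm]] at hsh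
          exact hsh
        have hsplit : (pvSelLoop (x :: rest) (pvLastIdx (x :: rest)) rest.length
              [(m : Int)] ++ [((0 : Nat) : Int)]).reverse
            = ((0 : Nat) : Int) :: (pvSelLoop (x :: rest) (pvLastIdx (x :: rest)) rest.length
              [(m : Int)]).reverse := by simp
        rw [hsplit, List.map_cons, hout]
        rw [← pv_A_run rest hrne, ih rest.length (by omega) rest rfl]
        simp

-- ===== VERDICT (by name: the statement is the Claim_ definition above) =====
theorem loop_erasure_spec : Claim_equal_loop_erasure := by
  intro path _
  unfold Spec_loop_erasure loop_erasure_alt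
  rw [pv_A_eq_LE, pv_B_eq_LE]
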